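-- pv_equiv track=rewrite | github.com/bautista00/ProyectoDataLeague | ETAPA_1/validaciones.py | validar_equipos_habilitados
-- ===== SOURCE A (Python) =====
-- def validar_equipos_habilitados(equipos, local, visitante):
--     local_habilitado = False
--     visitante_habilitado = False
--
--     for equipo in equipos:
--         if equipo[1] == local and equipo[2] == 'H':
--             local_habilitado = True
--         if equipo[1] == visitante and equipo[2] == 'H':
--             visitante_habilitado = True
--
--     return local_habilitado and visitante_habilitado
-- ===== SOURCE B (Python) =====
-- def validar_equipos_habilitados(equipos, local, visitante):
--     def habilitado(nombre):
--         for equipo in equipos: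
--             if equipo[1] == nombre and equipo[2] == 'H':
--                 return True
--         return False
--     return habilitado(local) and habilitado(visitante)
-- ===== Notes on version B (the rewrite author's own statement) =====
-- stated objective: simpler
-- what changed: Replaces A's single pass accumulating two boolean flags over the whole list with a per-team helper that scans and returns at the first matching enabled row, called once per team with short-circuit (the visitante scan is skipped when local is not enabled).
import Mathlib
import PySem

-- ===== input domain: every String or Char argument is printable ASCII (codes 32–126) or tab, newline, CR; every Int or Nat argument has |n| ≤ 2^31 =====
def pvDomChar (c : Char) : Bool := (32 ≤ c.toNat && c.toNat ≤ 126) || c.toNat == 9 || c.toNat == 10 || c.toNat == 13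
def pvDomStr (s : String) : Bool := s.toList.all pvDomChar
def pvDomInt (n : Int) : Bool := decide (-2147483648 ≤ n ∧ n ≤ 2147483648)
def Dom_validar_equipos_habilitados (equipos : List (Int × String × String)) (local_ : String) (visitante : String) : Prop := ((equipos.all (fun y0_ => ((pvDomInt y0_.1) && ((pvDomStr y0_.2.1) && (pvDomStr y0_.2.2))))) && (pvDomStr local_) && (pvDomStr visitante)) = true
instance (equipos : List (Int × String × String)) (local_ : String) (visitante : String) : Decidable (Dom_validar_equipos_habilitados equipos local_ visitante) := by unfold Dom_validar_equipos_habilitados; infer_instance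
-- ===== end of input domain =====

-- ===== PORT A =====
-- B replaces A's one-pass double-flag accumulation with a per-team early-return scan called twice with short-circuit (objective: simpler).
def validar_equipos_habilitados (equipos : List (Int × String × String)) (local_ : String) (visitante : String) : Bool :=
  let st := equipos.foldl (fun (st : Bool × Bool) equipo =>
    let st1 := if equipo.2.1 == local_ && equipo.2.2 == "H" then (true, st.2) else st
    if equipo.2.1 == visitante && equipo.2.2 == "H" then (st1.1, true) else st1) (false, false)
  st.1 && st.2

-- ===== PORT B =====
-- early-return loop of Source B's helper: stops at the first matching enabled row
def pvHabilitado (equipos : List (Int × String × String)) (nombre : String) : Bool :=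
  match equipos with
  | [] => false
  | equipo :: tl =>
    if equipo.2.1 == nombre && equipo.2.2 == "H" then true
    else pvHabilitado tl nombre

def validar_equipos_habilitados_alt (equipos : List (Int × String × String)) (local_ : String) (visitante : String) : Bool :=
  pvHabilitado equipos local_ && pvHabilitado equipos visitante

-- ===== PRECONDITION & SPEC =====
def Spec_validar_equipos_habilitados (equipos : List (Int × String × String)) (local_ : String) (visitante : String) (out : Bool) : Prop := out = validar_equipos_habilitados_alt equipos local_ visitante
instance (equipos : List (Int × String × String)) (local_ : String) (visitante : String) (out : Bool) : Decidable (Spec_validar_equipos_habilitados equipos local_ visitante out) := by unfold Spec_validar_equipos_habilitados; infer_instance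

-- ===== CLAIM (what is proved, stated in full; the proofs are below) =====
def Claim_equal_validar_equipos_habilitados : Prop := ∀ (equipos : List (Int × String × String)) (local_ : String) (visitante : String), Dom_validar_equipos_habilitados equipos local_ visitante → Spec_validar_equipos_habilitados equipos local_ visitante (validar_equipos_habilitados equipos local_ visitante)

-- ===== LEMMAS AND PROOFS =====

-- A's fold computes, in each component, "initial flag OR some row matches".
lemma foldA_char (equipos : List (Int × String × String)) (local_ visitante : String) :
    ∀ a b : Bool,
      equipos.foldl (fun (st : Bool × Bool) equipo =>
        let st1 := if equipo.2.1 == local_ && equipo.2.2 == "H" then (true, st.2) else st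
        if equipo.2.1 == visitante && equipo.2.2 == "H" then (st1.1, true) else st1) (a, b)
      = (a || equipos.any (fun e => e.2.1 == local_ && e.2.2 == "H"),
         b || equipos.any (fun e => e.2.1 == visitante && e.2.2 == "H")) := by
  induction equipos with
  | nil => simp
  | cons e tl ih =>
    intro a b
    have step : (let st1 := if e.2.1 == local_ && e.2.2 == "H" then (true, (a, b).2) else (a, b)
        if e.2.1 == visitante && e.2.2 == "H" then (st1.1, true) else st1)
        = (a || (e.2.1 == local_ && e.2.2 == "H"), b || (e.2.1 == visitante && e.2.2 == "H")) := by
      by_cases hl : ((e.2.1 == local_ && e.2.2 == "H") = true) <;>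
        by_cases hv : ((e.2.1 == visitante && e.2.2 == "H") = true) <;>
        simp [hl, hv]
    rw [List.foldl_cons]
    show List.foldl _ (let st1 := if e.2.1 == local_ && e.2.2 == "H" then (true, (a, b).2) else (a, b); if e.2.1 == visitante && e.2.2 == "H" then (st1.1, true) else st1) tl = _
    rw [step, ih]
    simp [Bool.or_assoc]

-- B's early-return scan equals "some row matches".
lemma habilitado_any (equipos : List (Int × String × String)) (x : String) :
    pvHabilitado equipos x = equipos.any (fun e => e.2.1 == x && e.2.2 == "H") := by
  induction equipos with
  | nil => rfl
  | cons e tl ih =>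
    by_cases h : ((e.2.1 == x && e.2.2 == "H") = true) <;> simp [pvHabilitado, h, ih]

-- ===== VERDICT (by name: the statement is the Claim_ definition above) =====
theorem validar_equipos_habilitados_spec : Claim_equal_validar_equipos_habilitados := by
  intro equipos local_ visitante _
  unfold Spec_validar_equipos_habilitados validar_equipos_habilitados validar_equipos_habilitados_alt
  simp only [foldA_char, habilitado_any, Bool.false_or]
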